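-- pv_equiv track=rewrite | github.com/theplanboxchris/byme | micropython/ble_utils.py | decode_manufacturer
-- ===== SOURCE A (Python) =====
-- def decode_manufacturer(adv_data):
--
--     adv_data = bytes(adv_data)
--
--     """Return manufacturer data as a list of 4-byte little-endian integers (first AD type 0xFF) or None."""
--     i = 0
--     while i + 1 < len(adv_data):
--         length = adv_data[i]
--         if length == 0:
--             break
--         ad_type = adv_data[i + 1]
--         if ad_type == 0xFF:
--             start = i + 2
--             end = start + length - 1
--             mdata = adv_data[start:end]
--             # Convert to array of 4-byte little-endian ints
--             return [int.from_bytes(mdata[j:j+4], 'little') for j in range(0, len(mdata), 4) if len(mdata[j:j+4]) == 4]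
--         i += 1 + length
--     return None
-- ===== SOURCE B (Python) =====
-- def decode_manufacturer(adv_data):
--     adv_data = bytes(adv_data)
--     """Return manufacturer data as a list of 4-byte little-endian integers (first AD type 0xFF) or None."""
--     # Parse ALL AD structures into a table (first occurrence of each type wins),
--     # then look up the manufacturer-specific type 0xFF.
--     fields = {}
--     i = 0
--     while i + 1 < len(adv_data):
--         length = adv_data[i]
--         if length == 0:
--             break
--         fields.setdefault(adv_data[i + 1], adv_data[i + 2:i + 1 + length])
--         i += 1 + length
--     payload = fields.get(0xFF)
--     if payload is None:
--         return None
--     out = []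
--     while len(payload) >= 4:
--         b0, b1, b2, b3 = payload[0], payload[1], payload[2], payload[3]
--         out.append(b0 + b1 * 256 + b2 * 65536 + b3 * 16777216)
--         payload = payload[4:]
--     return out
-- ===== Notes on version B (the rewrite author's own statement) =====
-- stated objective: alternative
-- what changed: B parses the whole advertisement once into a type->payload table (setdefault keeps the first occurrence) and then looks up type 0xFF and chunks its payload by an explicit 4-byte recursion, replacing A's scan-and-return-early with range/slice comprehension.
import Mathlib
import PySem

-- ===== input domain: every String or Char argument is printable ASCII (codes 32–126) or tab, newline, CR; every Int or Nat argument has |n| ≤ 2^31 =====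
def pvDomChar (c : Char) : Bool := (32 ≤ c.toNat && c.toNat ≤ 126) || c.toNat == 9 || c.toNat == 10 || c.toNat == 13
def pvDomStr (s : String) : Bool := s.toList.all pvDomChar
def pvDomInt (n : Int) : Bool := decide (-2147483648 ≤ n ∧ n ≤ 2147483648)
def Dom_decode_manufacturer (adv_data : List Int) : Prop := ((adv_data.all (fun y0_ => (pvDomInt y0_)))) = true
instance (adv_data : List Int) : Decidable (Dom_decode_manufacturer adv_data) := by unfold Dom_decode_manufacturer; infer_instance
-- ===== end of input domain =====

-- B parses the whole advertisement into a type->payload table (first occurrence kept, setdefault)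
-- and then looks up type 0xFF, instead of A's scan-that-returns-early; alternative decomposition.


-- ===== PORT A =====
-- int.from_bytes(l, 'little') on a list of bytes: b0 + 256*b1 + 256^2*b2 + … (exact for byte values)
def pvFromLE (l : List Int) : Int := l.foldr (fun b acc => b + 256 * acc) 0

-- the comprehension: [int.from_bytes(mdata[j:j+4],'little') for j in range(0,len(mdata),4) if len(mdata[j:j+4])==4]
def pvChunksA (mdata : List Int) : List Int :=
  (PySem.List.pyRange 0 (mdata.length : Int) 4).filterMap (fun j =>
    if (PySem.List.slice mdata (some j) (some (j + 4))).length = 4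
    then some (pvFromLE (PySem.List.slice mdata (some j) (some (j + 4)))) else none)

-- A's while loop; fuel = remaining allowed iterations (adv.length + 1 always suffices, i advances by ≥ 2)
def pvLoopA (adv : List Int) : Nat → Int → Option (List Int)
  | 0, _ => none
  | fuel + 1, i =>
    if i + 1 < (adv.length : Int) then
      if PySem.List.pyGetD adv i 0 = 0 then none
      else if PySem.List.pyGetD adv (i + 1) 0 = 255 then
        some (pvChunksA (PySem.List.slice adv (some (i + 2)) (some (i + 2 + PySem.List.pyGetD adv i 0 - 1))))
      else pvLoopA adv fuel (i + 1 + PySem.List.pyGetD adv i 0)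
    else none

def decode_manufacturer (adv_data : List Int) : Option (List Int) :=
  pvLoopA adv_data (adv_data.length + 1) 0

-- ===== PORT B =====
-- B's 4-byte little-endian chunking loop (drops a trailing partial chunk)
def pvChunk4 : List Int → List Int
  | b0 :: b1 :: b2 :: b3 :: rest =>
      (b0 + b1 * 256 + b2 * 65536 + b3 * 16777216) :: pvChunk4 rest
  | _ => []

-- B's table-building while loop: ad_type -> payload, first occurrence kept (setdefault)
def pvLoopB (adv : List Int) : Nat → Int → PySem.Dict Int (List Int) → PySem.Dict Int (List Int)
  | 0, _, d => d
  | fuel + 1, i, d =>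
    if i + 1 < (adv.length : Int) then
      if PySem.List.pyGetD adv i 0 = 0 then d
      else
        pvLoopB adv fuel (i + 1 + PySem.List.pyGetD adv i 0)
          (d.setdefault (PySem.List.pyGetD adv (i + 1) 0)
            (PySem.List.slice adv (some (i + 2)) (some (i + 1 + PySem.List.pyGetD adv i 0))))
    else d

def decode_manufacturer_alt (adv_data : List Int) : Option (List Int) :=
  match (pvLoopB adv_data (adv_data.length + 1) 0 PySem.Dict.empty).get? 255 with
  | none => none
  | some payload => some (pvChunk4 payload)

-- ===== PRECONDITION & SPEC =====
-- Pre_: bytes(adv_data) raises ValueError/TypeError unless every element is a byte value 0..255;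
-- exactly there A (and B alike) raise, so those inputs are excluded.
def Pre_decode_manufacturer (adv_data : List Int) : Prop :=
  ∀ b ∈ adv_data, 0 ≤ b ∧ b ≤ 255

instance (adv_data : List Int) : Decidable (Pre_decode_manufacturer adv_data) := by
  unfold Pre_decode_manufacturer; infer_instance

def pvWitness_decode_manufacturer : List Int := [5, 255, 1, 2, 3, 4]

def Spec_decode_manufacturer (adv_data : List Int) (out : Option (List Int)) : Prop :=
  out = decode_manufacturer_alt adv_data
instance (adv_data : List Int) (out : Option (List Int)) : Decidable (Spec_decode_manufacturer adv_data out) := by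
  unfold Spec_decode_manufacturer; infer_instance

-- ===== CLAIM (what is proved, stated in full; the proofs are below) =====
def Claim_equal_decode_manufacturer : Prop := ∀ (adv_data : List Int), Dom_decode_manufacturer adv_data → Pre_decode_manufacturer adv_data → Spec_decode_manufacturer adv_data (decode_manufacturer adv_data)

-- ===== LEMMAS AND PROOFS =====

-- A's comprehension, re-read through drop/take (proof-only helper)
def pvGoAStep (l : List Int) (k : Nat) : Option Int :=
  if ((l.drop (4 * k)).take 4).length = 4 then some (pvFromLE ((l.drop (4 * k)).take 4)) else none

def pvGoA (l : List Int) : List Int :=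
  (List.range ((l.length + 3) / 4)).filterMap (pvGoAStep l)

lemma chunksA_as_go (l : List Int) : pvChunksA l = pvGoA l := by
  unfold pvChunksA pvGoA
  rw [PySem.List.pyRange_of_pos 0 (l.length : Int) (by norm_num)]
  have hc : (if (0:Int) < (l.length : Int) then (((l.length : Int) - 0 + 4 - 1) / 4).toNat else 0)
      = (l.length + 3) / 4 := by
    by_cases h : (0:Int) < (l.length : Int)
    · rw [if_pos h]; omega
    · rw [if_neg h]
      have h0 : l.length = 0 := by omega
      simp [h0]
  rw [hc, List.filterMap_map]
  apply List.filterMap_congr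
  intro k _
  have e2 : (0:Int) + 4 * (k : Int) + 4 = ((4 * k : Nat) : Int) + ((4 : Nat) : Int) := by
    push_cast; ring
  have e1 : (0:Int) + 4 * (k : Int) = ((4 * k : Nat) : Int) := by push_cast; ring
  show (if (PySem.List.slice l (some ((0:Int) + 4 * (k : Int))) (some ((0:Int) + 4 * (k : Int) + 4))).length = 4
        then some (pvFromLE (PySem.List.slice l (some ((0:Int) + 4 * (k : Int))) (some ((0:Int) + 4 * (k : Int) + 4)))) else none)
      = pvGoAStep l k
  rw [e2, e1, PySem.List.slice_natCast_add]
  rfl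

lemma goA_cons4 (b0 b1 b2 b3 : Int) (rest : List Int) :
    pvGoA (b0 :: b1 :: b2 :: b3 :: rest)
      = (b0 + b1 * 256 + b2 * 65536 + b3 * 16777216) :: pvGoA rest := by
  unfold pvGoA
  have hcnt : ((b0 :: b1 :: b2 :: b3 :: rest).length + 3) / 4 = (rest.length + 3) / 4 + 1 := by
    simp only [List.length_cons]; omega
  rw [hcnt, List.range_succ_eq_map, List.filterMap_cons, List.filterMap_map]
  have hhead : pvGoAStep (b0 :: b1 :: b2 :: b3 :: rest) 0
      = some (b0 + b1 * 256 + b2 * 65536 + b3 * 16777216) := by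
    simp [pvGoAStep, pvFromLE]; ring
  rw [hhead]
  congr 1

-- A's range/slice comprehension computes the same chunks as B's 4-at-a-time recursion.
lemma goA_eq_chunk4 : ∀ (n : Nat) (l : List Int), l.length ≤ n → pvGoA l = pvChunk4 l := by
  intro n
  induction n with
  | zero =>
    intro l h
    match l, h with
    | [], _ => simp [pvGoA, pvChunk4]
  | succ n ih =>
    intro l h
    match l with
    | [] => simp [pvGoA, pvChunk4]
    | [a] => simp [pvGoA, pvGoAStep, pvChunk4, List.range_succ]
    | [a, b] => simp [pvGoA, pvGoAStep, pvChunk4, List.range_succ]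
    | [a, b, c] => simp [pvGoA, pvGoAStep, pvChunk4, List.range_succ]
    | a :: b :: c :: d :: rest =>
      rw [goA_cons4]
      have hr : rest.length ≤ n := by
        simp only [List.length_cons] at h; omega
      rw [ih rest hr]
      rfl

lemma chunksA_eq_chunk4 (l : List Int) : pvChunksA l = pvChunk4 l := by
  rw [chunksA_as_go]
  exact goA_eq_chunk4 l.length l le_rfl

-- setdefault never disturbs a key already present: the parse loop preserves the first 0xFF payload.
lemma loopB_preserves (adv : List Int) :
    ∀ (fuel : Nat) (i : Int) (d : PySem.Dict Int (List Int)) (v : List Int),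
      d.get? 255 = some v → (pvLoopB adv fuel i d).get? 255 = some v := by
  intro fuel
  induction fuel with
  | zero => intro i d v h; simpa [pvLoopB] using h
  | succ n ih =>
    intro i d v h
    unfold pvLoopB
    by_cases h1 : i + 1 < (adv.length : Int)
    · rw [if_pos h1]
      by_cases h2 : PySem.List.pyGetD adv i 0 = 0
      · rw [if_pos h2]; exact h
      · rw [if_neg h2]
        apply ih
        by_cases hc : d.contains (PySem.List.pyGetD adv (i + 1) 0) = true
        · rw [PySem.Dict.setdefault_of_contains d _ hc]; exact h
        · rw [PySem.Dict.setdefault_of_not_contains d _ (by simpa using hc)]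
          have hne : (255 : Int) ≠ PySem.List.pyGetD adv (i + 1) 0 := by
            intro he
            apply hc
            rw [← he, PySem.Dict.contains_eq_isSome_get?, h]
            rfl
          rw [PySem.Dict.get?_insert_of_ne d _ hne]
          exact h
    · rw [if_neg h1]; exact h

-- main invariant: B's parse-then-lookup equals A's early-return scan, for any fuel.
lemma loop_inv (adv : List Int) :
    ∀ (fuel : Nat) (i : Int) (d : PySem.Dict Int (List Int)),
      d.get? 255 = none →
      (match (pvLoopB adv fuel i d).get? 255 with
       | none => none
       | some p => some (pvChunk4 p)) = pvLoopA adv fuel i := by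
  intro fuel
  induction fuel with
  | zero => intro i d h; simp [pvLoopA, pvLoopB, h]
  | succ n ih =>
    intro i d h
    unfold pvLoopA pvLoopB
    by_cases h1 : i + 1 < (adv.length : Int)
    · rw [if_pos h1, if_pos h1]
      by_cases h2 : PySem.List.pyGetD adv i 0 = 0
      · rw [if_pos h2, if_pos h2, h]
      · rw [if_neg h2, if_neg h2]
        by_cases h3 : PySem.List.pyGetD adv (i + 1) 0 = 255
        · rw [if_pos h3]
          have hc : d.contains (PySem.List.pyGetD adv (i + 1) 0) = false := by
            rw [h3, PySem.Dict.contains_eq_isSome_get?, h]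
            rfl
          rw [PySem.Dict.setdefault_of_not_contains d _ hc, h3]
          rw [loopB_preserves adv n _ _ _ (PySem.Dict.get?_insert_self d 255 _)]
          have harg : i + 2 + PySem.List.pyGetD adv i 0 - 1 = i + 1 + PySem.List.pyGetD adv i 0 := by
            ring
          rw [harg, chunksA_eq_chunk4]
        · rw [if_neg h3]
          apply ih
          by_cases hc : d.contains (PySem.List.pyGetD adv (i + 1) 0) = true
          · rw [PySem.Dict.setdefault_of_contains d _ hc]; exact h
          · rw [PySem.Dict.setdefault_of_not_contains d _ (by simpa using hc)]
            have hne : (255 : Int) ≠ PySem.List.pyGetD adv (i + 1) 0 := fun he => h3 he.symm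
            rw [PySem.Dict.get?_insert_of_ne d _ hne]
            exact h
    · rw [if_neg h1, if_neg h1, h]

-- ===== VERDICT (by name: the statement is the Claim_ definition above) =====
theorem decode_manufacturer_spec : Claim_equal_decode_manufacturer := by
  intro adv _ _
  unfold Spec_decode_manufacturer decode_manufacturer decode_manufacturer_alt
  exact (loop_inv adv (adv.length + 1) 0 PySem.Dict.empty (PySem.Dict.get?_empty 255)).symm
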